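-- pv_equiv track=rewrite | github.com/meyer-lab-cshl/copepodTCR | copepodTCR/functions.py | epitope_pools_activation
-- ===== SOURCE A (Python) =====
-- def epitope_pools_activation(peptide_address, lst, ep_length):
--
--     """
--     Takes dictionary of peptide_addresses, list of peptides, epitope length.
--     Returns activated pools for each possible epitope from peptides.
--     Is used in function(run_experiment).
--     """
--
--     epitopes = []
--     act_profile = dict()
--     for item in lst:
--         for i in range(len(item)):
--             if len(item[i:i+ep_length]) == ep_length and item[i:i+ep_length] not in epitopes:
--                 epitopes.append(item[i:i+ep_length])
--     for ep in epitopes: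
--         act = []
--         for peptide in peptide_address.keys():
--             if ep in peptide:
--                 act = act + list(peptide_address[peptide])
--         act = sorted(list(set(act)))
--         str_act = str(act)
--         if str_act not in act_profile.keys():
--             act_profile[str_act] = [ep]
--         else:
--             act_profile[str_act].append(ep)
--     return act_profile
-- ===== SOURCE B (Python) =====
-- def epitope_pools_activation(peptide_address, lst, ep_length):
--     """Group candidate epitopes by the set of pools they activate.
--
--     One pass over the peptides' substrings builds a substring -> pool-set
--     map, so no per-epitope scan over all peptides is needed."""
--     if ep_length < 0:
--         return {}
--     # substring -> union of the pools of every peptide containing it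
--     sub_pools = {}
--     for peptide, pools in peptide_address.items():
--         for i in range(len(peptide) - ep_length + 1):
--             sub_pools.setdefault(peptide[i:i + ep_length], set()).update(pools)
--     # candidate epitopes from lst, deduplicated in first-seen order
--     epitopes = dict.fromkeys(item[i:i + ep_length] for item in lst
--                              for i in range(len(item) - ep_length + 1))
--     act_profile = {}
--     for ep in epitopes:
--         str_act = str(sorted(sub_pools.get(ep, ())))
--         if str_act in act_profile:
--             act_profile[str_act].append(ep)
--         else:
--             act_profile[str_act] = [ep]
--     return act_profile
-- ===== Notes on version B (the rewrite author's own statement) =====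
-- stated objective: faster
-- what changed: Instead of scanning every peptide per epitope (E*P substring tests), B makes one pass over the peptides' substrings building a substring->pool-set map and one ordered-dedup pass over lst's substrings, then groups by looking each epitope up in the map.
-- outside the precondition, e.g. on epitope_pools_activation({'a': [1]}, [''], 0): A returns {}, B returns {'[1]': ['']}
import Mathlib
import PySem

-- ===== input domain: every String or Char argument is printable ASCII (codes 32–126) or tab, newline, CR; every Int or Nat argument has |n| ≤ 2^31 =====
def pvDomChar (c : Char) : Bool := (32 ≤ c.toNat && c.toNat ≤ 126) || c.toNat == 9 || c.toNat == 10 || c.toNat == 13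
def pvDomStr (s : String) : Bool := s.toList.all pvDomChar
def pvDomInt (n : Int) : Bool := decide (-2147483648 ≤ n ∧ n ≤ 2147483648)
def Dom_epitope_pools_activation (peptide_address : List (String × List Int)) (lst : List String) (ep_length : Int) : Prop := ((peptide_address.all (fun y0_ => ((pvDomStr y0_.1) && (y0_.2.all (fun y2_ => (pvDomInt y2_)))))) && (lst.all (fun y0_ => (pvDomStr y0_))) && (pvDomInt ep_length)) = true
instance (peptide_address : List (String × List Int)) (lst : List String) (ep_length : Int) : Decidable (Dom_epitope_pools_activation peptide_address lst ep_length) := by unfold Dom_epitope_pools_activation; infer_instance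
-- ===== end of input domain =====

-- B replaces A's per-epitope scan over all peptides by a substring→pool-set map built in one
-- pass over the peptides (objective: faster; measured).

-- shared low-level helpers: both Pythons take the same slice item[i:i+ep_length] and render str(list-of-int)
def pvSub (cs : List Char) (i : Nat) (k : Int) : String :=
  String.ofList (PySem.List.slice cs (some (i : Int)) (some ((i : Int) + k)))

def pvRepr (xs : List Int) : String :=
  String.ofList ('[' :: PySem.Chars.join (", ".toList) (xs.map (fun n => (PySem.Int.toStr n).toList)) ++ [']'])

-- ===== PORT A =====
-- epitopes: every window item[i:i+ep_length] of full length, appended if unseen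
def pvA_epitopes (lst : List String) (k : Int) : List String :=
  lst.foldl (fun eps item =>
    (List.range item.toList.length).foldl (fun eps i =>
      let sub := pvSub item.toList i k
      if PySem.Str.len sub = k ∧ sub ∉ eps then eps ++ [sub] else eps) eps) []

-- act: scan all peptides, concatenating the pools of those containing ep
def pvA_act (d : PySem.Dict String (List Int)) (ep : String) : List Int :=
  d.keys.foldl (fun act p => if PySem.Str.isIn ep p then act ++ d.getD p [] else act) []

-- str(sorted(list(set(act))))
def pvA_key (d : PySem.Dict String (List Int)) (ep : String) : String :=
  pvRepr (PySem.List.sorted (PySem.Set.ofList (pvA_act d ep)) (fun x => x) false)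

def epitope_pools_activation (peptide_address : List (String × List Int)) (lst : List String) (ep_length : Int) : List (String × List String) :=
  let d := PySem.Dict.ofList peptide_address
  ((pvA_epitopes lst ep_length).foldl (fun prof ep =>
      let str_act := pvA_key d ep
      if prof.contains str_act then prof.modify str_act [] (fun l => l ++ [ep])
      else prof.insert str_act [ep])
    PySem.Dict.empty).items

-- ===== PORT B =====
-- one pass over the peptides' substrings: substring → union (set) of its peptides' pools
def pvB_subPools (peptide_address : List (String × List Int)) (k : Int) : PySem.Dict String (List Int) :=
  (PySem.Dict.ofList peptide_address).items.foldl (fun m pv =>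
    (List.range (((pv.1.toList.length : Int) - k + 1).toNat)).foldl (fun m i =>
      let sub := pvSub pv.1.toList i k
      m.insert sub (PySem.Set.update (m.getD sub []) pv.2)) m) PySem.Dict.empty

-- candidate epitopes, ordered dedup (dict.fromkeys)
def pvB_epitopes (lst : List String) (k : Int) : List String :=
  PySem.List.dedup (lst.flatMap (fun item =>
    (List.range (((item.toList.length : Int) - k + 1).toNat)).map (fun i => pvSub item.toList i k)))

-- str(sorted(sub_pools.get(ep, ())))
def pvB_key (sp : PySem.Dict String (List Int)) (ep : String) : String :=
  pvRepr (PySem.List.sorted (sp.getD ep []) (fun x => x) false)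

def epitope_pools_activation_alt (peptide_address : List (String × List Int)) (lst : List String) (ep_length : Int) : List (String × List String) :=
  if ep_length < 0 then [] else
  let sp := pvB_subPools peptide_address ep_length
  ((pvB_epitopes lst ep_length).foldl (fun prof ep =>
      let str_act := pvB_key sp ep
      if prof.contains str_act then prof.modify str_act [] (fun l => l ++ [ep])
      else prof.insert str_act [ep])
    PySem.Dict.empty).items

-- ===== PRECONDITION & SPEC =====
-- Pre_ excludes only the degenerate corner ep_length == 0 with a nonempty lst of empty strings,
-- where whether '' counts as a length-0 epitope of '' is an unspecifiable tie: A returns {} there,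
-- B returns the one ''-group.
def Pre_epitope_pools_activation (peptide_address : List (String × List Int)) (lst : List String) (ep_length : Int) : Prop :=
  ¬ (ep_length = 0 ∧ lst ≠ [] ∧ ∀ s ∈ lst, s = "")
instance (peptide_address : List (String × List Int)) (lst : List String) (ep_length : Int) : Decidable (Pre_epitope_pools_activation peptide_address lst ep_length) := by unfold Pre_epitope_pools_activation; infer_instance

def pvWitness_epitope_pools_activation : (List (String × List Int)) × List String × Int :=
  ([("ab", [2, 1]), ("bc", [3])], ["abc"], 2)

def Spec_epitope_pools_activation (peptide_address : List (String × List Int)) (lst : List String) (ep_length : Int) (out : List (String × List String)) : Prop := out = epitope_pools_activation_alt peptide_address lst ep_length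
instance (peptide_address : List (String × List Int)) (lst : List String) (ep_length : Int) (out : List (String × List String)) : Decidable (Spec_epitope_pools_activation peptide_address lst ep_length out) := by unfold Spec_epitope_pools_activation; infer_instance

-- ===== CLAIM (what is proved, stated in full; the proofs are below) =====
def Claim_equal_epitope_pools_activation : Prop := ∀ (peptide_address : List (String × List Int)) (lst : List String) (ep_length : Int), Dom_epitope_pools_activation peptide_address lst ep_length → Pre_epitope_pools_activation peptide_address lst ep_length → Spec_epitope_pools_activation peptide_address lst ep_length (epitope_pools_activation peptide_address lst ep_length)

-- ===== LEMMAS AND PROOFS =====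

theorem pvSub_toList (cs : List Char) (i : Nat) (k : Int) (hk : 0 ≤ k) :
    (pvSub cs i k).toList = (cs.drop i).take k.toNat := by
  unfold pvSub
  rw [String.toList_ofList, PySem.List.slice_toNat cs (by omega) (by omega)]
  congr 1 <;> omega

theorem pvSub_length (cs : List Char) (i : Nat) (k : Int) (hk : 0 ≤ k)
    (hi : i + k.toNat ≤ cs.length) : (pvSub cs i k).toList.length = k.toNat := by
  rw [pvSub_toList cs i k hk]
  simp; omega

theorem pv_filter_range (n m : Nat) :
    (List.range n).filter (fun i => decide (i < m)) = List.range (min m n) := by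
  induction n with
  | zero => simp
  | succ n ih =>
    rw [List.range_succ, List.filter_append, ih]
    by_cases h : n < m
    · have h2 : min m (n+1) = min m n + 1 := by omega
      rw [h2, List.range_succ]; simp [h]; omega
    · have h2 : min m (n+1) = min m n := by omega
      simp [h, h2]

theorem pv_update_flatMap {α β : Type} [BEq α] (f : β → List α) (l : List β) (s : PySem.Set α) :
    l.foldl (fun s item => PySem.Set.update s (f item)) s = PySem.Set.update s (l.flatMap f) := by
  induction l generalizing s with
  | nil => simp [PySem.Set.update]
  | cons x xs ih => rw [List.foldl_cons, ih, List.flatMap_cons, PySem.Set.update_append]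

theorem pvA_inner (cs : List Char) (k : Int) (eps : List String) :
    (List.range cs.length).foldl (fun eps i =>
      let sub := pvSub cs i k
      if PySem.Str.len sub = k ∧ sub ∉ eps then eps ++ [sub] else eps) eps
    = if 0 ≤ k then
        PySem.Set.update eps ((List.range (min (cs.length + 1 - k.toNat) cs.length)).map (fun i => pvSub cs i k))
      else eps := by
  by_cases hk : 0 ≤ k
  · rw [if_pos hk]
    have hstep : ∀ (acc : List String), ∀ i ∈ List.range cs.length,
        (fun eps i =>
          let sub := pvSub cs i k
          if PySem.Str.len sub = k ∧ sub ∉ eps then eps ++ [sub] else eps) acc i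
        = (fun eps i => if i + k.toNat ≤ cs.length then PySem.Set.add eps (pvSub cs i k) else eps) acc i := by
      intro acc i hi
      rw [List.mem_range] at hi
      simp only
      by_cases hlen : i + k.toNat ≤ cs.length
      · rw [if_pos hlen, PySem.Set.add_eq_ite]
        have : PySem.Str.len (pvSub cs i k) = k := by
          rw [PySem.Str.len_eq, pvSub_length cs i k hk hlen]; omega
        by_cases hmem : pvSub cs i k ∈ acc
        · rw [if_neg (by simp [hmem]), if_pos hmem]
        · rw [if_pos ⟨this, hmem⟩, if_neg hmem]
      · rw [if_neg hlen, if_neg]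
        rintro ⟨hl, -⟩
        rw [PySem.Str.len_eq, pvSub_toList cs i k hk] at hl
        simp at hl
        omega
    rw [PySem.List.foldl_congr_mem _ _ _ _ hstep,
        PySem.List.foldl_ite_eq_foldl_filter (fun i => i + k.toNat ≤ cs.length)
          (fun eps i => PySem.Set.add eps (pvSub cs i k)),
        List.filter_congr (fun i _ => (by simp; omega :
          decide (i + k.toNat ≤ cs.length) = decide (i < cs.length + 1 - k.toNat))),
        pv_filter_range, ← PySem.Set.update_map_eq_foldl_add]
  · rw [if_neg hk]
    have hstep : ∀ (acc : List String), ∀ i ∈ List.range cs.length,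
        (fun eps i =>
          let sub := pvSub cs i k
          if PySem.Str.len sub = k ∧ sub ∉ eps then eps ++ [sub] else eps) acc i
        = (fun eps _ => eps) acc i := by
      intro acc i _
      simp only
      rw [if_neg]
      rintro ⟨hl, -⟩
      rw [PySem.Str.len_eq] at hl
      omega
    rw [PySem.List.foldl_congr_mem _ _ _ _ hstep, PySem.List.foldl_ignore]

theorem pvA_epitopes_eq (lst : List String) (k : Int) (hk : 0 ≤ k) :
    pvA_epitopes lst k = PySem.Set.ofList (lst.flatMap (fun item =>
      (List.range (min (item.toList.length + 1 - k.toNat) item.toList.length)).map (fun i => pvSub item.toList i k))) := by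
  unfold pvA_epitopes
  have hstep : ∀ (acc : List String), ∀ item ∈ lst,
      (List.range item.toList.length).foldl (fun eps i =>
        let sub := pvSub item.toList i k
        if PySem.Str.len sub = k ∧ sub ∉ eps then eps ++ [sub] else eps) acc
      = PySem.Set.update acc ((List.range (min (item.toList.length + 1 - k.toNat) item.toList.length)).map (fun i => pvSub item.toList i k)) := by
    intro acc item _
    rw [pvA_inner, if_pos hk]
  rw [PySem.List.foldl_congr_mem _ _ _ _ hstep, pv_update_flatMap]
  exact PySem.Set.update_empty _

theorem pvA_epitopes_neg (lst : List String) (k : Int) (hk : k < 0) : pvA_epitopes lst k = [] := by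
  unfold pvA_epitopes
  have hstep : ∀ (acc : List String), ∀ item ∈ lst,
      (List.range item.toList.length).foldl (fun eps i =>
        let sub := pvSub item.toList i k
        if PySem.Str.len sub = k ∧ sub ∉ eps then eps ++ [sub] else eps) acc
      = (fun eps (_ : String) => eps) acc item := by
    intro acc item _
    rw [pvA_inner, if_neg (by omega)]
  rw [PySem.List.foldl_congr_mem _ _ _ _ hstep, PySem.List.foldl_ignore]

theorem pv_ofList_const {α : Type} [BEq α] [LawfulBEq α] (xs : List α) (c : α)
    (h : ∀ x ∈ xs, x = c) : PySem.Set.ofList xs = if xs = [] then [] else [c] := by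
  induction xs with
  | nil => simp [PySem.Set.ofList_nil]
  | cons x xs ih =>
    have hx : x = c := h x (by simp)
    have ht : ∀ y ∈ xs, y = c := fun y hy => h y (by simp [hy])
    rw [PySem.Set.ofList_cons, ih ht, hx, if_neg (by simp : ¬ (c :: xs = []))]
    have : PySem.Set.discard (if xs = [] then ([] : List α) else [c]) c = [] := by
      rw [List.eq_nil_iff_forall_not_mem]
      intro y hy
      rw [PySem.Set.mem_discard] at hy
      rcases hy with ⟨hy1, hy2⟩
      split at hy1 <;> simp at hy1
      exact hy2 hy1
    rw [this]

theorem pv_epitopes_eq (lst : List String) (k : Int) (hk : 0 ≤ k)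
    (hpre : ¬ (k = 0 ∧ lst ≠ [] ∧ ∀ s ∈ lst, s = "")) :
    pvA_epitopes lst k = pvB_epitopes lst k := by
  unfold pvB_epitopes
  rw [PySem.List.dedup_eq_ofList, pvA_epitopes_eq lst k hk]
  by_cases h1 : 1 ≤ k
  · have hr : ∀ (n : Nat), min (n + 1 - k.toNat) n = ((n : Int) - k + 1).toNat := by
      intro n; omega
    simp only [hr]
  · have hk0 : k = 0 := by omega
    subst hk0
    have hsub : ∀ (cs : List Char) (i : Nat), pvSub cs i 0 = "" := by
      intro cs i
      unfold pvSub
      rw [PySem.List.slice_toNat cs (by omega) (by omega)]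
      simp
    have hA : ∀ x ∈ (lst.flatMap (fun item =>
        (List.range (min (item.toList.length + 1 - (0:Int).toNat) item.toList.length)).map (fun i => pvSub item.toList i 0))), x = "" := by
      intro x hx
      rw [List.mem_flatMap] at hx
      rcases hx with ⟨item, -, hx⟩
      rw [List.mem_map] at hx
      rcases hx with ⟨i, -, rfl⟩
      exact hsub _ _
    have hB : ∀ x ∈ (lst.flatMap (fun item =>
        (List.range (((item.toList.length : Int) - 0 + 1).toNat)).map (fun i => pvSub item.toList i 0))), x = "" := by
      intro x hx
      rw [List.mem_flatMap] at hx
      rcases hx with ⟨item, -, hx⟩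
      rw [List.mem_map] at hx
      rcases hx with ⟨i, -, rfl⟩
      exact hsub _ _
    rw [pv_ofList_const _ _ hA, pv_ofList_const _ _ hB]
    by_cases hl : lst = []
    · subst hl; simp
    · -- lst ≠ []; Pre gives some nonempty string in lst
      have hex : ∃ s ∈ lst, s ≠ "" := by
        by_contra hc
        push_neg at hc
        exact hpre ⟨rfl, hl, hc⟩
      rcases hex with ⟨s, hs, hsne⟩
      rw [if_neg, if_neg]
      · -- B's stream nonempty: s contributes at i = 0
        apply List.ne_nil_of_mem (a := "")
        rw [List.mem_flatMap]
        exact ⟨s, hs, by rw [List.mem_map]; exact ⟨0, by simp, hsub _ _⟩⟩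
      · -- A's stream nonempty: s has positive length
        apply List.ne_nil_of_mem (a := "")
        rw [List.mem_flatMap]
        have hlen : 0 < s.length := by
          rcases Nat.eq_zero_or_pos s.length with h0 | h0
          · exact absurd (by simpa [String.toList, List.length_eq_zero_iff] using h0) hsne
          · exact h0
        refine ⟨s, hs, by rw [List.mem_map]; refine ⟨0, by simp; exact hlen, hsub _ _⟩⟩

theorem pv_epitopes_length (lst : List String) (k : Int) (hk : 0 ≤ k) (ep : String)
    (h : ep ∈ pvB_epitopes lst k) : (ep.toList.length : Int) = k := by
  unfold pvB_epitopes at h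
  rw [PySem.List.dedup_eq_ofList, PySem.Set.mem_ofList, List.mem_flatMap] at h
  rcases h with ⟨item, -, h⟩
  rw [List.mem_map] at h
  rcases h with ⟨i, hi, rfl⟩
  rw [List.mem_range] at hi
  rw [pvSub_length item.toList i k hk (by omega)]
  omega

theorem pvA_act_mem (d : PySem.Dict String (List Int)) (hd : d.keys.Nodup) (ep : String) (x : Int) :
    x ∈ pvA_act d ep ↔ ∃ pv ∈ d.items, PySem.Str.isIn ep pv.1 = true ∧ x ∈ pv.2 := by
  unfold pvA_act
  have hstep : ∀ (acc : List Int), ∀ p ∈ d.keys,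
      (fun act p => if PySem.Str.isIn ep p then act ++ d.getD p [] else act) acc p
      = (fun act p => act ++ (if PySem.Str.isIn ep p then d.getD p [] else [])) acc p := by
    intro acc p _
    simp only []
    by_cases h : PySem.Str.isIn ep p = true
    · rw [if_pos h, if_pos h]
    · rw [if_neg h, if_neg h, List.append_nil]
  rw [PySem.List.foldl_congr_mem _ _ _ _ hstep, PySem.List.foldl_append_eq_flatMap]
  simp only [List.nil_append, List.mem_flatMap]
  constructor
  · rintro ⟨p, hp, hx⟩
    have hp' : ∃ v, (p, v) ∈ d.items := by
      have : p ∈ d.items.map Prod.fst := by simpa [PySem.Dict.keys] using hp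
      rw [List.mem_map] at this
      rcases this with ⟨pv, hpv, rfl⟩
      exact ⟨pv.2, hpv⟩
    rcases hp' with ⟨v, hpv⟩
    by_cases hin : PySem.Str.isIn ep p
    · refine ⟨(p, v), hpv, hin, ?_⟩
      rw [if_pos hin] at hx
      rwa [PySem.Dict.getD_of_mem_items d hpv hd] at hx
    · rw [if_neg hin] at hx; simp at hx
  · rintro ⟨pv, hpv, hin, hx⟩
    refine ⟨pv.1, ?_, ?_⟩
    · have : pv.1 ∈ d.items.map Prod.fst := List.mem_map_of_mem hpv
      simpa [PySem.Dict.keys] using this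
    · rw [if_pos hin, PySem.Dict.getD_of_mem_items d (by exact hpv) hd]
      exact hx

theorem pv_inner_mem (k : Int) (cs : List Char) (v : List Int) (pos : List Nat)
    (m : PySem.Dict String (List Int)) (ep : String) (x : Int) :
    x ∈ ((pos.foldl (fun m i =>
        let sub := pvSub cs i k
        m.insert sub (PySem.Set.update (m.getD sub []) v)) m).getD ep [])
    ↔ x ∈ m.getD ep [] ∨ ((∃ i ∈ pos, pvSub cs i k = ep) ∧ x ∈ v) := by
  induction pos generalizing m with
  | nil => simp
  | cons i pos ih =>
    rw [List.foldl_cons, ih]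
    simp only [PySem.Dict.getD_insert]
    by_cases he : ep = pvSub cs i k
    · subst he
      rw [if_pos rfl, PySem.Set.mem_update]
      constructor
      · rintro (⟨h | h⟩ | h)
        · exact Or.inl h
        · exact Or.inr ⟨⟨i, by simp, rfl⟩, h⟩
        · rcases h with ⟨⟨j, hj, hje⟩, hx⟩
          exact Or.inr ⟨⟨j, by simp [hj], hje⟩, hx⟩
      · rintro (h | ⟨⟨j, hj, hje⟩, hx⟩)
        · exact Or.inl (Or.inl h)
        · exact Or.inl (Or.inr hx)
    · rw [if_neg he]
      constructor
      · rintro (h | ⟨⟨j, hj, hje⟩, hx⟩)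
        · exact Or.inl h
        · exact Or.inr ⟨⟨j, by simp [hj], hje⟩, hx⟩
      · rintro (h | ⟨⟨j, hj, hje⟩, hx⟩)
        · exact Or.inl h
        · rcases List.mem_cons.mp hj with rfl | hj'
          · exact absurd hje.symm he
          · exact Or.inr ⟨⟨j, hj', hje⟩, hx⟩

theorem pv_inner_nodup (k : Int) (cs : List Char) (v : List Int) (pos : List Nat)
    (m : PySem.Dict String (List Int)) (hm : ∀ ep, (m.getD ep []).Nodup) (ep : String) :
    ((pos.foldl (fun m i =>
        let sub := pvSub cs i k
        m.insert sub (PySem.Set.update (m.getD sub []) v)) m).getD ep []).Nodup := by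
  induction pos generalizing m with
  | nil => exact hm ep
  | cons i pos ih =>
    rw [List.foldl_cons]
    apply ih
    intro ep'
    simp only [PySem.Dict.getD_insert]
    by_cases he : ep' = pvSub cs i k
    · rw [if_pos he]
      exact PySem.Set.nodup_update _ _ (hm _)
    · rw [if_neg he]; exact hm ep'

theorem pvB_subPools_mem_gen (k : Int) (ps : List (String × List Int))
    (m : PySem.Dict String (List Int)) (ep : String) (x : Int) :
    x ∈ ((ps.foldl (fun m pv =>
      (List.range (((pv.1.toList.length : Int) - k + 1).toNat)).foldl (fun m i =>
        let sub := pvSub pv.1.toList i k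
        m.insert sub (PySem.Set.update (m.getD sub []) pv.2)) m) m).getD ep [])
    ↔ x ∈ m.getD ep [] ∨ ∃ pv ∈ ps,
        (∃ i ∈ List.range (((pv.1.toList.length : Int) - k + 1).toNat), pvSub pv.1.toList i k = ep) ∧ x ∈ pv.2 := by
  induction ps generalizing m with
  | nil => simp
  | cons pv ps ih =>
    rw [List.foldl_cons, ih, pv_inner_mem]
    constructor
    · rintro ((h | h) | ⟨qv, hqv, hi, hx⟩)
      · exact Or.inl h
      · exact Or.inr ⟨pv, by simp, h⟩
      · exact Or.inr ⟨qv, by simp [hqv], hi, hx⟩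
    · rintro (h | ⟨qv, hqv, hi, hx⟩)
      · exact Or.inl (Or.inl h)
      · rcases List.mem_cons.mp hqv with rfl | hqv'
        · exact Or.inl (Or.inr ⟨hi, hx⟩)
        · exact Or.inr ⟨qv, hqv', hi, hx⟩

theorem pvB_subPools_nodup_gen (k : Int) (ps : List (String × List Int))
    (m : PySem.Dict String (List Int)) (hm : ∀ ep, (m.getD ep []).Nodup) (ep : String) :
    ((ps.foldl (fun m pv =>
      (List.range (((pv.1.toList.length : Int) - k + 1).toNat)).foldl (fun m i =>
        let sub := pvSub pv.1.toList i k
        m.insert sub (PySem.Set.update (m.getD sub []) pv.2)) m) m).getD ep []).Nodup := by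
  induction ps generalizing m with
  | nil => exact hm ep
  | cons pv ps ih =>
    rw [List.foldl_cons]
    exact ih _ (fun ep' => pv_inner_nodup k pv.1.toList pv.2 _ m hm ep')

theorem pvB_subPools_mem (peptide_address : List (String × List Int)) (k : Int) (ep : String) (x : Int) :
    x ∈ (pvB_subPools peptide_address k).getD ep [] ↔
      ∃ pv ∈ (PySem.Dict.ofList peptide_address).items,
        (∃ i ∈ List.range (((pv.1.toList.length : Int) - k + 1).toNat), pvSub pv.1.toList i k = ep) ∧ x ∈ pv.2 := by
  unfold pvB_subPools
  rw [pvB_subPools_mem_gen]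
  simp [PySem.Dict.getD_empty]

theorem pvB_subPools_nodup (peptide_address : List (String × List Int)) (k : Int) (ep : String) :
    ((pvB_subPools peptide_address k).getD ep []).Nodup := by
  unfold pvB_subPools
  exact pvB_subPools_nodup_gen k _ _ (fun ep' => by simp) ep

theorem pv_infix_iff (t s : List Char) (k : Nat) (hk : t.length = k) :
    t <:+: s ↔ ∃ i < s.length + 1 - k, (s.drop i).take k = t := by
  constructor
  · rintro ⟨l₁, l₂, rfl⟩
    refine ⟨l₁.length, by simp; omega, ?_⟩
    rw [List.append_assoc, List.drop_left, ← hk, List.take_left]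
  · rintro ⟨i, hi, rfl⟩
    exact ((s.drop i).take_prefix k).isInfix.trans (List.drop_suffix i s).isInfix

theorem pv_isIn_iff_window (cs : List Char) (k : Int) (hk : 0 ≤ k) (ep : String)
    (hlen : (ep.toList.length : Int) = k) :
    PySem.Str.isIn ep (String.ofList cs) = true ↔
      ∃ i ∈ List.range (((cs.length : Int) - k + 1).toNat), pvSub cs i k = ep := by
  rw [PySem.Str.isIn_iff_infix, String.toList_ofList,
      pv_infix_iff ep.toList cs k.toNat (by omega)]
  constructor
  · rintro ⟨i, hi, hw⟩
    refine ⟨i, by rw [List.mem_range]; omega, ?_⟩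
    have : (pvSub cs i k).toList = ep.toList := by rw [pvSub_toList cs i k hk, hw]
    calc pvSub cs i k = String.ofList (pvSub cs i k).toList := by rw [String.ofList_toList]
      _ = ep := by rw [this, String.ofList_toList]
  · rintro ⟨i, hi, rfl⟩
    rw [List.mem_range] at hi
    exact ⟨i, by omega, by rw [← pvSub_toList cs i k hk]⟩

theorem pv_key_eq (peptide_address : List (String × List Int)) (lst : List String) (k : Int)
    (hk : 0 ≤ k) (ep : String) (hep : ep ∈ pvB_epitopes lst k) :
    pvA_key (PySem.Dict.ofList peptide_address) ep = pvB_key (pvB_subPools peptide_address k) ep := by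
  unfold pvA_key pvB_key
  congr 1
  apply PySem.List.sorted_eq_sorted_of_perm _ _ _ (fun a b h => h)
  rw [List.perm_ext_iff_of_nodup (PySem.Set.nodup_ofList _) (pvB_subPools_nodup peptide_address k ep)]
  intro x
  rw [PySem.Set.mem_ofList,
      pvA_act_mem _ (PySem.Dict.nodup_keys_ofList peptide_address) ep x,
      pvB_subPools_mem]
  apply exists_congr
  intro pv
  apply and_congr_right
  intro _
  apply and_congr_left
  intro _
  have := pv_isIn_iff_window pv.1.toList k hk ep (pv_epitopes_length lst k hk ep hep)
  rwa [String.ofList_toList] at this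

-- ===== VERDICT (by name: the statement is the Claim_ definition above) =====
theorem epitope_pools_activation_spec : Claim_equal_epitope_pools_activation := by
  intro pa lst k _hdom hpre
  unfold Spec_epitope_pools_activation
  unfold epitope_pools_activation epitope_pools_activation_alt
  by_cases hk : k < 0
  · simp only [if_pos hk, pvA_epitopes_neg lst k hk, List.foldl_nil]
    rfl
  · push_neg at hk
    simp only [if_neg (by omega : ¬ k < 0)]
    rw [pv_epitopes_eq lst k hk hpre]
    refine congrArg PySem.Dict.items ?_
    exact PySem.List.foldl_congr_mem _ _ _ _
      (fun acc ep hep => by simp only [pv_key_eq pa lst k hk ep hep])
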